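-- pv_equiv track=rewrite | github.com/hdeep03/advent-of-code | 2023/python/day-01/b.py | _get_text_digits
-- ===== SOURCE A (Python) =====
-- def _get_text_digits(text: str):
--     text_to_num = {"one": 1, "two": 2, "three": 3, "four": 4, "five": 5, "six": 6, "seven": 7, "eight": 8, "nine": 9}
--     ret = []
--     for string, num in text_to_num.items():
--         start = text.find(string, 0)
--         while start != -1:
--             ret.append((start, num))
--             start = text.find(string, start+len(string))
--     return sorted(ret, key=lambda x: x[0])
-- ===== SOURCE B (Python) =====
-- def _get_text_digits(text: str):
--     words = [("one", 1), ("two", 2), ("three", 3), ("four", 4), ("five", 5),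
--              ("six", 6), ("seven", 7), ("eight", 8), ("nine", 9)]
--     ret = []
--     for i in range(len(text)):
--         for word, num in words:
--             if text[i:i+len(word)] == word:
--                 ret.append((i, num))
--     return ret
-- ===== Notes on version B (the rewrite author's own statement) =====
-- stated objective: simpler
-- what changed: Replaces the nine per-word find-and-skip scans followed by a stability-dependent sort with a single left-to-right pass over positions that tests each digit word by slicing, emitting matches already in position order with no sort.
import Mathlib
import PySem

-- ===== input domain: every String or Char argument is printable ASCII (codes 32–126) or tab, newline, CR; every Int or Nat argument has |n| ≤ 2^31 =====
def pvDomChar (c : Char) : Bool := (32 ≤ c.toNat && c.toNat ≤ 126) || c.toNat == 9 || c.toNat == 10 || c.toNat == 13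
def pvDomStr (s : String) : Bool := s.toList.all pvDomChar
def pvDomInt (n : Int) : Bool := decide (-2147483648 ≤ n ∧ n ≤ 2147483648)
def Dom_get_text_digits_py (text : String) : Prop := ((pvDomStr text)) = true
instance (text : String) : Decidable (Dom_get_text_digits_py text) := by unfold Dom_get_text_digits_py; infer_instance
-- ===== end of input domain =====

-- B replaces A's nine find-and-skip scans plus a final sort by a single left-to-right pass over
-- positions that tests each digit word by slicing, so matches come out already in position order
-- and no sort is needed (objective: simpler).

-- ===== PORT A =====
-- the dict literal {"one": 1, ..., "nine": 9} as an association list (items in insertion order)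

def pvDigitsA : List (List Char × Int) :=
  [("one".toList, 1), ("two".toList, 2), ("three".toList, 3), ("four".toList, 4),
   ("five".toList, 5), ("six".toList, 6), ("seven".toList, 7), ("eight".toList, 8),
   ("nine".toList, 9)]

-- the 'while start != -1' loop of A; fuel cs.length + 1 strictly exceeds the number of
-- iterations (each non-final iteration sits at a distinct index < cs.length, see pv_loop_eq
-- below), so with this fuel the recursion is exactly Python's while loop
def pvFindLoopA (cs w : List Char) (num : Int) (start : Int)
    (acc : List (Int × Int)) (fuel : Nat) : List (Int × Int) :=
  match fuel with
  | 0 => acc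
  | fuel + 1 =>
    if start = -1 then acc
    else pvFindLoopA cs w num (PySem.Chars.findFrom cs w (start + (w.length : Int)))
        (acc ++ [(start, num)]) fuel

def get_text_digits_py (text : String) : List (Int × Int) :=
  PySem.List.sorted
    (pvDigitsA.foldl
      (fun acc p => pvFindLoopA text.toList p.1 p.2 (PySem.Chars.findFrom text.toList p.1 0) acc
        (text.toList.length + 1)) [])
    (fun x => x.1) false

-- ===== PORT B =====
def pvWordsB : List (List Char × Int) :=
  [("one".toList, 1), ("two".toList, 2), ("three".toList, 3), ("four".toList, 4),
   ("five".toList, 5), ("six".toList, 6), ("seven".toList, 7), ("eight".toList, 8),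
   ("nine".toList, 9)]

def get_text_digits_py_alt (text : String) : List (Int × Int) :=
  (PySem.List.pyRange 0 (text.toList.length : Int)).foldl
    (fun acc i => pvWordsB.foldl
      (fun acc2 p =>
        if PySem.List.slice text.toList (some i) (some (i + (p.1.length : Int))) == p.1
        then acc2 ++ [(i, p.2)] else acc2) acc) []

-- ===== PRECONDITION & SPEC =====
def Spec_get_text_digits_py (text : String) (out : List (Int × Int)) : Prop := out = get_text_digits_py_alt text
instance (text : String) (out : List (Int × Int)) : Decidable (Spec_get_text_digits_py text out) := by unfold Spec_get_text_digits_py; infer_instance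

-- ===== CLAIM (what is proved, stated in full; the proofs are below) =====
def Claim_equal_get_text_digits_py : Prop := ∀ (text : String), Dom_get_text_digits_py text → Spec_get_text_digits_py text (get_text_digits_py text)

-- ===== LEMMAS AND PROOFS =====

-- occurrence predicate: the word w starts at index i of cs, and i >= s
def pvOccP (cs w : List Char) (s : Nat) (i : Nat) : Bool :=
  decide (w <+: cs.drop i) && decide (s ≤ i)

-- the ascending list of occurrence positions of w in cs that are >= s
def pvOcc (cs w : List Char) (s : Nat) : List Nat :=
  (List.range cs.length).filter (pvOccP cs w s)

-- w has no nontrivial border (checked by decide on each digit word): any shift d with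
-- 0 < d < |w| is refuted by a position j with w[j+d] != w[j]; hence occurrences of w
-- cannot overlap, which is why A's find-and-skip loop misses no occurrence
def pvBF (w : List Char) : Bool :=
  (List.range w.length).all fun d =>
    (d == 0) || (List.range w.length).any fun j =>
      decide (j + d < w.length) && !(w[j+d]? == w[j]?)

lemma pv_prefix_getElem? {w l : List Char} (h : w <+: l) {i : Nat} (hi : i < w.length) :
    l[i]? = w[i]? := by
  obtain ⟨t, rfl⟩ := h; rw [List.getElem?_append_left hi]

lemma pv_nonoverlap {w : List Char} (hbf : pvBF w = true) {cs : List Char} {p q : Nat}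
    (hp : w <+: cs.drop p) (hq : w <+: cs.drop q) (hlt : p < q) : p + w.length ≤ q := by
  by_contra hcon
  push Not at hcon
  rw [pvBF, List.all_eq_true] at hbf
  have h3 := hbf (q - p) (List.mem_range.mpr (by omega))
  simp only [Bool.or_eq_true, beq_iff_eq, List.any_eq_true, Bool.and_eq_true,
    decide_eq_true_eq, Bool.not_eq_true', beq_eq_false_iff_ne, List.mem_range] at h3
  rcases h3 with h3 | ⟨j, _, hjd, hne⟩
  · omega
  · apply hne
    have e1 : w[j]? = cs[q + j]? := by
      rw [← pv_prefix_getElem? hq (by omega), List.getElem?_drop]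
    have e2 : w[j + (q - p)]? = cs[p + (j + (q - p))]? := by
      rw [← pv_prefix_getElem? hp hjd, List.getElem?_drop]
    rw [e1, e2]
    congr 1
    omega

lemma pv_occ_split {cs w : List Char} (hw : w ≠ []) (hbf : pvBF w = true) {s p : Nat}
    (hp : w <+: cs.drop p) (hsp : s ≤ p)
    (hmin : ∀ i, s ≤ i → i < p → ¬ w <+: cs.drop i) :
    pvOcc cs w s = p :: pvOcc cs w (p + w.length) := by
  have hpn : p + w.length ≤ cs.length := by
    have h1 := hp.length_le
    rw [List.length_drop] at h1
    have h2 : 0 < w.length := List.length_pos_iff.mpr hw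
    omega
  have hwpos : 0 < w.length := List.length_pos_iff.mpr hw
  have hn : cs.length = (p + 1) + (cs.length - (p + 1)) := by omega
  unfold pvOcc
  rw [hn, List.range_add, List.filter_append, List.filter_append]
  have h1 : (List.range (p + 1)).filter (pvOccP cs w s) = [p] := by
    rw [List.range_succ, List.filter_append]
    have hz : (List.range p).filter (pvOccP cs w s) = [] := by
      rw [List.filter_eq_nil_iff]
      intro i hi
      have hip : i < p := List.mem_range.mp hi
      simp only [pvOccP, Bool.and_eq_true, decide_eq_true_eq, not_and]
      intro hocc hsi
      exact absurd hocc (hmin i hsi hip)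
    rw [hz]
    simp [pvOccP, hp, hsp]
  have h2 : (List.range (p + 1)).filter (pvOccP cs w (p + w.length)) = [] := by
    rw [List.filter_eq_nil_iff]
    intro i hi
    have : i < p + 1 := List.mem_range.mp hi
    simp only [pvOccP, Bool.and_eq_true, decide_eq_true_eq, not_and]
    intro _
    omega
  have h3 : ((List.range (cs.length - (p + 1))).map (fun x => (p + 1) + x)).filter (pvOccP cs w s)
      = ((List.range (cs.length - (p + 1))).map (fun x => (p + 1) + x)).filter (pvOccP cs w (p + w.length)) := by
    apply List.filter_congr
    intro i hi
    obtain ⟨x, hx, rfl⟩ := List.mem_map.mp hi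
    simp only [pvOccP]
    by_cases hocc : w <+: cs.drop (p + 1 + x)
    · have := pv_nonoverlap hbf hp hocc (by omega)
      simp [hocc, show s ≤ p + 1 + x by omega, this]
    · simp [hocc]
  rw [h1, h2, h3]
  simp

lemma pv_loop_eq {cs w : List Char} (num : Int) (hw : w ≠ []) (hbf : pvBF w = true) :
    ∀ (fuel : Nat) (s : Nat) (acc : List (Int × Int)), s ≤ cs.length →
      (pvOcc cs w s).length < fuel →
      pvFindLoopA cs w num (PySem.Chars.findFrom cs w (s : Int)) acc fuel
        = acc ++ (pvOcc cs w s).map (fun (i : Nat) => ((i : Int), num)) := by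
  intro fuel
  induction fuel with
  | zero => intro s acc _ h; omega
  | succ fuel ih =>
    intro s acc hs hlen
    by_cases hneg : PySem.Chars.findFrom cs w (s : Int) = -1
    · have hninf : ¬ w <:+: cs.drop s :=
        (PySem.Chars.findFrom_natCast_eq_neg_one_iff cs w s hs).mp hneg
      have hocc : pvOcc cs w s = [] := by
        rw [pvOcc, List.filter_eq_nil_iff]
        intro i hi
        simp only [pvOccP, Bool.and_eq_true, decide_eq_true_eq, not_and]
        intro hpref hsi
        exfalso
        apply hninf
        have : cs.drop i = (cs.drop s).drop (i - s) := by
          rw [List.drop_drop]; congr 1; omega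
        rw [this] at hpref
        exact hpref.isInfix.trans (List.drop_suffix _ _).isInfix
      rw [hocc]
      simp [pvFindLoopA, hneg]
    · obtain ⟨hge, hpref, hmin⟩ := PySem.Chars.findFrom_natCast_spec cs w s hs hneg
      set r := PySem.Chars.findFrom cs w (s : Int) with hr
      have hr0 : (0 : Int) ≤ r := le_trans (by exact_mod_cast Nat.zero_le s) hge
      have hrp : r = ((r.toNat : Nat) : Int) := by omega
      set p := r.toNat with hpdef
      have hsp : s ≤ p := by omega
      have hsplit := pv_occ_split hw hbf hpref hsp hmin
      rw [pvFindLoopA, if_neg hneg]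
      have hnext : r + (w.length : Int) = ((p + w.length : Nat) : Int) := by push_cast; omega
      rw [hnext]
      have hple : p + w.length ≤ cs.length := by
        have h1 := hpref.length_le
        rw [List.length_drop] at h1
        have h2 : 0 < w.length := List.length_pos_iff.mpr hw
        omega
      rw [ih (p + w.length) (acc ++ [(r, num)]) hple (by rw [hsplit] at hlen; simpa using Nat.lt_of_succ_lt_succ hlen)]
      rw [hsplit]
      simp [hrp]

lemma pvA_eq (text : String) :
    get_text_digits_py text = PySem.List.sorted
      (pvDigitsA.flatMap fun p => (pvOcc text.toList p.1 0).map (fun (i : Nat) => ((i : Int), p.2)))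
      (fun x => x.1) false := by
  unfold get_text_digits_py
  congr 1
  rw [PySem.List.foldl_congr_mem pvDigitsA _
      (fun acc p => acc ++ (pvOcc text.toList p.1 0).map (fun (i : Nat) => ((i : Int), p.2))) [] ?_]
  · rw [PySem.List.foldl_append_eq_flatMap]
    simp
  · intro acc p hp
    have hwp : p.1 ≠ [] ∧ pvBF p.1 = true := by
      have hall : ∀ q ∈ pvDigitsA, q.1 ≠ [] ∧ pvBF q.1 = true := by decide
      exact hall p hp
    have hfuel : (pvOcc text.toList p.1 0).length < text.toList.length + 1 := by
      have := List.length_filter_le (pvOccP text.toList p.1 0) (List.range text.toList.length)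
      simp only [List.length_range] at this
      rw [pvOcc]
      omega
    have h0 : ((0 : Nat) : Int) = (0 : Int) := rfl
    rw [← h0]
    exact pv_loop_eq p.2 hwp.1 hwp.2 (text.toList.length + 1) 0 acc (Nat.zero_le _) hfuel

lemma pvB_eq (text : String) :
    get_text_digits_py_alt text
      = (List.range text.toList.length).flatMap
          (fun k => (pvWordsB.filter fun p => decide (p.1 <+: text.toList.drop k)).map
            fun p => ((k : Int), p.2)) := by
  unfold get_text_digits_py_alt
  rw [PySem.List.pyRange_zero_natCast, List.foldl_map]
  rw [PySem.List.foldl_congr_mem (List.range text.toList.length) _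
      (fun acc k => acc ++ (pvWordsB.filter fun p => decide (p.1 <+: text.toList.drop k)).map
        (fun p => ((k : Int), p.2))) [] ?_]
  · rw [PySem.List.foldl_append_eq_flatMap]
    simp
  · intro acc k _
    have hcond : ∀ p ∈ pvWordsB,
        (PySem.List.slice text.toList (some ((k : Nat) : Int)) (some (((k : Nat) : Int) + (p.1.length : Int))) == p.1)
          = decide (p.1 <+: text.toList.drop k) := by
      intro p _
      rw [PySem.List.slice_natCast_add]
      by_cases h : p.1 <+: text.toList.drop k
      · have he := (List.prefix_iff_eq_take.mp h).symm
        simp [he, h]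
      · have hne : List.take p.1.length (text.toList.drop k) ≠ p.1 :=
          fun he => h (List.prefix_iff_eq_take.mpr he.symm)
        simp [h, hne]
    rw [PySem.List.foldl_congr_mem pvWordsB _
        (fun acc2 p => if decide (p.1 <+: text.toList.drop k) then acc2 ++ [(((k:Nat):Int), p.2)] else acc2) acc ?_]
    · rw [PySem.List.foldl_append_if]
    · intro acc2 p hp
      rw [hcond p hp]

lemma pv_atmost1 {l : List Char} {p q : List Char × Int} (hp : p ∈ pvWordsB) (hq : q ∈ pvWordsB)
    (hpl : p.1 <+: l) (hql : q.1 <+: l) : p = q := by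
  have hnp : ∀ a ∈ pvWordsB, ∀ b ∈ pvWordsB, a.1 <+: b.1 → a = b := by decide
  rcases List.prefix_or_prefix_of_prefix hpl hql with h | h
  · exact hnp p hp q hq h
  · exact (hnp q hq p hp h).symm

lemma pv_filter_len (l : List Char) :
    (pvWordsB.filter fun p => decide (p.1 <+: l)).length ≤ 1 := by
  cases hfl : pvWordsB.filter (fun p => decide (p.1 <+: l)) with
  | nil => simp
  | cons x tl =>
    cases tl with
    | nil => simp
    | cons y t =>
      exfalso
      have hx : x ∈ pvWordsB.filter (fun p => decide (p.1 <+: l)) := by rw [hfl]; simp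
      have hy : y ∈ pvWordsB.filter (fun p => decide (p.1 <+: l)) := by rw [hfl]; simp
      rw [List.mem_filter, decide_eq_true_eq] at hx hy
      have hxy : x = y := pv_atmost1 hx.1 hy.1 hx.2 hy.2
      have hnd : (pvWordsB.filter (fun p => decide (p.1 <+: l))).Nodup :=
        List.Nodup.filter _ (by decide)
      rw [hfl, List.nodup_cons] at hnd
      exact hnd.1 (hxy ▸ List.mem_cons_self)

lemma pv_len_le_one_nodup {α : Type} {l : List α} (h : l.length ≤ 1) : l.Nodup := by
  match l with
  | [] => simp
  | [x] => simp
  | x :: y :: t => simp at h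

lemma pv_len_le_one_pairwise {α : Type} {R : α → α → Prop} {l : List α} (h : l.length ≤ 1) :
    l.Pairwise R := by
  match l with
  | [] => simp
  | [x] => simp
  | x :: y :: t => simp at h

lemma pv_nodupB (cs : List Char) :
    ((List.range cs.length).flatMap
      (fun k => (pvWordsB.filter fun p => decide (p.1 <+: cs.drop k)).map
        fun p => ((k : Int), p.2))).Nodup := by
  rw [List.flatMap_def, List.nodup_flatten]
  constructor
  · intro l hl
    obtain ⟨k, _, rfl⟩ := List.mem_map.mp hl
    exact pv_len_le_one_nodup (le_trans (by rw [List.length_map]) (pv_filter_len _))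
  · rw [List.pairwise_map]
    apply List.pairwise_lt_range.imp
    intro k k' hkk' x hx hx'
    obtain ⟨p, _, rfl⟩ := List.mem_map.mp hx
    obtain ⟨q, _, hq⟩ := List.mem_map.mp hx'
    have h2 : ((k' : Int), q.2).1 = ((k : Int), p.2).1 := congrArg Prod.fst hq
    simp only [] at h2
    exact absurd (by exact_mod_cast h2.symm) (Nat.ne_of_lt hkk')

lemma pv_pairwiseB (cs : List Char) :
    ((List.range cs.length).flatMap
      (fun k => (pvWordsB.filter fun p => decide (p.1 <+: cs.drop k)).map
        fun p => ((k : Int), p.2))).Pairwise (fun a b => a.1 < b.1) := by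
  rw [List.flatMap_def, List.pairwise_flatten]
  constructor
  · intro l hl
    obtain ⟨k, _, rfl⟩ := List.mem_map.mp hl
    exact pv_len_le_one_pairwise (le_trans (by rw [List.length_map]) (pv_filter_len _))
  · rw [List.pairwise_map]
    apply List.pairwise_lt_range.imp
    intro k k' hkk' x hx y hy
    obtain ⟨p, _, rfl⟩ := List.mem_map.mp hx
    obtain ⟨q, _, rfl⟩ := List.mem_map.mp hy
    show (k : Int) < (k' : Int)
    exact_mod_cast hkk'

lemma pv_nodupA (cs : List Char) :
    (pvDigitsA.flatMap fun p => (pvOcc cs p.1 0).map (fun (i : Nat) => ((i : Int), p.2))).Nodup := by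
  rw [List.flatMap_def, List.nodup_flatten]
  constructor
  · intro l hl
    obtain ⟨p, _, rfl⟩ := List.mem_map.mp hl
    apply List.Nodup.map
    · intro a b hab
      simpa using congrArg Prod.fst hab
    · exact List.Nodup.filter _ List.nodup_range
  · rw [List.pairwise_map]
    have hne : pvDigitsA.Pairwise (fun p q => p.2 ≠ q.2) := by decide
    apply hne.imp
    intro p q hpq x hx hx'
    obtain ⟨i, _, rfl⟩ := List.mem_map.mp hx
    obtain ⟨j, _, hj⟩ := List.mem_map.mp hx'
    exact hpq (by rw [← congrArg Prod.snd hj])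

lemma pv_permBA (cs : List Char) :
    ((List.range cs.length).flatMap
      (fun k => (pvWordsB.filter fun p => decide (p.1 <+: cs.drop k)).map
        fun p => ((k : Int), p.2))).Perm
    (pvDigitsA.flatMap fun p => (pvOcc cs p.1 0).map (fun (i : Nat) => ((i : Int), p.2))) := by
  rw [List.perm_ext_iff_of_nodup (pv_nodupB cs) (pv_nodupA cs)]
  intro a
  simp only [List.mem_flatMap, List.mem_map, List.mem_filter, List.mem_range,
    decide_eq_true_eq, pvOcc, pvOccP, Bool.and_eq_true]
  constructor
  · rintro ⟨k, hk, p, ⟨hp, hpre⟩, rfl⟩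
    exact ⟨p, hp, k, ⟨hk, hpre, by simp⟩, rfl⟩
  · rintro ⟨p, hp, i, ⟨hi, hpre, _⟩, rfl⟩
    exact ⟨i, hi, p, ⟨hp, hpre⟩, rfl⟩

lemma pv_main (text : String) : get_text_digits_py text = get_text_digits_py_alt text := by
  rw [pvA_eq, pvB_eq]
  exact PySem.List.sorted_eq_of_perm_of_pairwise_lt _ _ _ (pv_permBA text.toList)
    (pv_pairwiseB text.toList)

-- ===== VERDICT (by name: the statement is the Claim_ definition above) =====
theorem get_text_digits_py_spec : Claim_equal_get_text_digits_py := by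
  intro text _
  unfold Spec_get_text_digits_py
  exact pv_main text
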